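-- pv_equiv track=rewrite | github.com/ByteAcademyCo/Exercises | data_structures/dictionaries_and_arrays/shopping_list/solution/solution.py | cheapest_store
-- ===== SOURCE A (Python) =====
-- from math import inf
--
-- def grocery_cost(store_items, shopping_list):
--     total_cost = 0
--     for item in shopping_list:
--         if item in store_items:
--             total_cost += store_items[item]
--         else:
--             total_cost += 5
--     return total_cost
--
-- def cheapest_store(grocery_store, shopping_list):
--     min_cost = inf
--     min_store = ""
--     for store, store_items in grocery_store.items():
--         store_cost = grocery_cost(store_items, shopping_list)
--         if store_cost < min_cost:
--             min_cost = store_cost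
--             min_store = store
--         elif store_cost == min_cost and store < min_store:
--             min_store = store
--     return min_store
-- ===== SOURCE B (Python) =====
-- def cheapest_store(grocery_store, shopping_list):
--     # multiplicity of each wanted item
--     need = {}
--     for item in shopping_list:
--         need[item] = need.get(item, 0) + 1
--     # a store's cost = all-defaults baseline, adjusted per stocked item by its price difference
--     base = 5 * len(shopping_list)
--     ranking = sorted((base + sum((price - 5) * need.get(item, 0)
--                                  for item, price in items.items()), store)
--                      for store, items in grocery_store.items())
--     return ranking[0][1] if ranking else ""
-- ===== Notes on version B (the rewrite author's own statement) =====
-- stated objective: faster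
-- what changed: B inverts the data flow: it counts the shopping list once into a multiplicity dict, computes each store's cost by scanning the store's own inventory (baseline 5*len(list) plus (price-5)*multiplicity per stocked item) instead of looking every list item up per store, and selects the winner by sorting the (cost, store) pairs and taking the head instead of A's running-minimum scan with an inf sentinel and elif tie-break.
import Mathlib
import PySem

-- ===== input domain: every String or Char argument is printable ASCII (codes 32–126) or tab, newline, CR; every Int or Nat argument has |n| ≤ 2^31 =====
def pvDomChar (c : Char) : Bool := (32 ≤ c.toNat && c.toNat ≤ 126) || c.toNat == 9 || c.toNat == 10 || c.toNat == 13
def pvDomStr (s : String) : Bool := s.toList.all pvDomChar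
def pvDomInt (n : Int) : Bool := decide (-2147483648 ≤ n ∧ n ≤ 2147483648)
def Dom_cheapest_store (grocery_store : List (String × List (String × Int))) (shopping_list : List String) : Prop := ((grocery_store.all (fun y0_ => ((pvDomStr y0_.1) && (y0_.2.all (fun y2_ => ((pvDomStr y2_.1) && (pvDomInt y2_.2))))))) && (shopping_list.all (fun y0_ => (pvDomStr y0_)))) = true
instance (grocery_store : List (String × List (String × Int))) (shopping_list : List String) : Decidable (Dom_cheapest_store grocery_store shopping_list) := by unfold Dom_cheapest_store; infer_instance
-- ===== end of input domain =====

-- B counts the shopping list into a multiplicity dict, prices each store by scanning the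
-- store's own inventory (baseline 5*len plus (price-5)*multiplicity), and picks the winner
-- by sorting the (cost, store) pairs — replaces A's per-store rescan of the whole list (measured faster).

-- ===== PORT A =====
-- port of grocery_cost: running total, membership test then lookup (first match, like the Python dict)
def pvGroceryCost (store_items : List (String × Int)) (shopping_list : List String) : Int :=
  shopping_list.foldl
    (fun total_cost item =>
      match PySem.Dict.get? (PySem.Dict.mk store_items) item with
      | some v => total_cost + v
      | none => total_cost + 5)
    0

-- min_cost = inf is modelled as `none` (any int is < inf); min_store starts ""
def cheapest_store (grocery_store : List (String × List (String × Int))) (shopping_list : List String) : String :=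
  (grocery_store.foldl
    (fun (acc : Option Int × String) p =>
      match acc.1 with
      | none => (some (pvGroceryCost p.2 shopping_list), p.1)
      | some m =>
        if pvGroceryCost p.2 shopping_list < m then (some (pvGroceryCost p.2 shopping_list), p.1)
        else if pvGroceryCost p.2 shopping_list = m ∧ p.1 < acc.2 then (acc.1, p.1)
        else acc)
    ((none : Option Int), "")).2

-- ===== PORT B =====
def cheapest_store_alt (grocery_store : List (String × List (String × Int))) (shopping_list : List String) : String :=
  -- need[item] = need.get(item, 0) + 1
  let need : PySem.Dict String Int :=
    shopping_list.foldl (fun d item => d.insert item (d.getD item 0 + 1)) PySem.Dict.empty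
  let base : Int := 5 * (shopping_list.length : Int)
  -- sorted(...) on 2-tuples: Python tuple comparison = component keys (fst, snd)
  let ranking :=
    PySem.List.sorted2
      (grocery_store.map (fun p =>
        (base + (p.2.map (fun q => (q.2 - 5) * need.getD q.1 0)).sum, p.1)))
      (fun q => q.1) (fun q => q.2)
  match ranking with
  | [] => ""
  | q :: _ => q.2

-- ===== PRECONDITION & SPEC =====
-- Pre_ excludes association lists in which some store's item list repeats a key: such a list
-- represents no Python dict (store_items is a dict in A and B), and the two list encodings
-- weight the duplicate entries differently.
def Pre_cheapest_store (grocery_store : List (String × List (String × Int))) (shopping_list : List String) : Prop :=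
  ∀ p ∈ grocery_store, (p.2.map Prod.fst).Nodup
instance (grocery_store : List (String × List (String × Int))) (shopping_list : List String) : Decidable (Pre_cheapest_store grocery_store shopping_list) := by unfold Pre_cheapest_store; infer_instance

def pvWitness_cheapest_store : (List (String × List (String × Int))) × List String :=
  ([("shop", [("milk", 3), ("eggs", 2)]), ("mart", [("milk", 4)])], ["milk", "eggs", "jam"])

def Spec_cheapest_store (grocery_store : List (String × List (String × Int))) (shopping_list : List String) (out : String) : Prop := out = cheapest_store_alt grocery_store shopping_list
instance (grocery_store : List (String × List (String × Int))) (shopping_list : List String) (out : String) : Decidable (Spec_cheapest_store grocery_store shopping_list out) := by unfold Spec_cheapest_store; infer_instance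

-- ===== CLAIM (what is proved, stated in full; the proofs are below) =====
def Claim_equal_cheapest_store : Prop := ∀ (grocery_store : List (String × List (String × Int))) (shopping_list : List String), Dom_cheapest_store grocery_store shopping_list → Pre_cheapest_store grocery_store shopping_list → Spec_cheapest_store grocery_store shopping_list (cheapest_store grocery_store shopping_list)

-- ===== LEMMAS AND PROOFS =====

-- the lexicographic key both selections minimise (a pair IS its own key)
def pvKey (q : Int × String) : Lex (Int × String) := toLex (q.1, q.2)

theorem pvKey_inj {a b : Int × String} (h : pvKey a = pvKey b) : a = b := by
  have := congrArg (fun x : Lex (Int × String) => ofLex x) h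
  simpa [pvKey] using this

-- the Bool comparison used by Python's tuple '<' (and by B's sort) is the Lex order
theorem pvBefore_eq (a b : Int × String) :
    (decide (a.1 < b.1) || !decide (b.1 < a.1) && decide (a.2 < b.2))
    = decide (pvKey a < pvKey b) := by
  rcases lt_trichotomy a.1 b.1 with h | h | h
  · simp [pvKey, Prod.Lex.lt_iff, h, h.asymm]
  · simp [pvKey, Prod.Lex.lt_iff, h]
  · simp [pvKey, Prod.Lex.lt_iff, h, h.asymm, h.ne']

-- B's sorted2 on pairs is sorting by the Lex key
theorem pvSorted2_eq (xs : List (Int × String)) :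
    PySem.List.sorted2 xs (fun q => q.1) (fun q => q.2) = PySem.List.sorted xs pvKey := by
  show xs.foldl (fun acc x => PySem.List.insertBy
        (fun a b => decide (a.1 < b.1) || !decide (b.1 < a.1) && decide (a.2 < b.2)) x acc) []
      = xs.foldl (fun acc x => PySem.List.insertBy (fun a b => decide (pvKey a < pvKey b)) x acc) []
  congr 1
  funext acc x
  congr 1
  funext a b
  exact pvBefore_eq a b

-- named copies of A's loop body and of a first-minimum fold it is reshaped into
def pvStepA (shopping_list : List String) (acc : Option Int × String) (p : String × List (String × Int)) : Option Int × String :=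
  match acc.1 with
  | none => (some (pvGroceryCost p.2 shopping_list), p.1)
  | some m =>
    if pvGroceryCost p.2 shopping_list < m then (some (pvGroceryCost p.2 shopping_list), p.1)
    else if pvGroceryCost p.2 shopping_list = m ∧ p.1 < acc.2 then (acc.1, p.1)
    else acc

def pvStepB (acc : Option (Int × String)) (x : Int × String) : Option (Int × String) :=
  match acc with
  | none => some x
  | some mm => if (decide (x.1 < mm.1) || !decide (mm.1 < x.1) && decide (x.2 < mm.2)) = true then some x else some mm

def pvPair (shopping_list : List String) (p : String × List (String × Int)) : Int × String :=
  (pvGroceryCost p.2 shopping_list, p.1)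

theorem pvPortA_eq (g : List (String × List (String × Int))) (sl : List String) :
    cheapest_store g sl = (g.foldl (pvStepA sl) ((none : Option Int), "")).2 := rfl

-- A's running-minimum loop, once started, is the pvStepB fold on the (cost, store) pairs
theorem pvLoop_eq (shopping_list : List String) (t : List (String × List (String × Int))) :
    ∀ (m : Int) (s : String),
    t.foldl (pvStepA shopping_list) (some m, s)
    = match (t.map (pvPair shopping_list)).foldl pvStepB (some (m, s)) with
      | some q => (some q.1, q.2)
      | none => ((none : Option Int), "") := by
  induction t with
  | nil => intro m s; simp
  | cons p t ih =>
    intro m s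
    simp only [List.foldl_cons, List.map_cons]
    by_cases h1 : pvGroceryCost p.2 shopping_list < m
    · have ha : pvStepA shopping_list (some m, s) p = (some (pvGroceryCost p.2 shopping_list), p.1) := by
        simp [pvStepA, h1]
      have hb : pvStepB (some (m, s)) (pvPair shopping_list p) = some (pvGroceryCost p.2 shopping_list, p.1) := by
        simp [pvStepB, pvPair, h1]
      rw [ha, hb, ih]
    · by_cases h2 : pvGroceryCost p.2 shopping_list = m ∧ p.1 < s
      · obtain ⟨hm, hs⟩ := h2
        have ha : pvStepA shopping_list (some m, s) p = (some m, p.1) := by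
          simp [pvStepA, hm, hs]
        have hb : pvStepB (some (m, s)) (pvPair shopping_list p) = some (m, p.1) := by
          have hcond : (decide ((pvPair shopping_list p).1 < m) || !decide (m < (pvPair shopping_list p).1) && decide ((pvPair shopping_list p).2 < s)) = true := by
            simp [pvPair, hm, hs]
          rw [pvStepB, if_pos hcond]
          simp [pvPair, hm]
        rw [ha, hb, ih]
      · have hmle : m ≤ pvGroceryCost p.2 shopping_list := not_lt.1 h1
        have ha : pvStepA shopping_list (some m, s) p = (some m, s) := by
          simp only [pvStepA]
          rw [if_neg h1, if_neg h2]
        have hb : pvStepB (some (m, s)) (pvPair shopping_list p) = some (m, s) := by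
          have hcond : ¬ ((decide ((pvPair shopping_list p).1 < m) || !decide (m < (pvPair shopping_list p).1) && decide ((pvPair shopping_list p).2 < s)) = true) := by
            rcases Decidable.em (pvGroceryCost p.2 shopping_list = m) with hm | hm
            · have hns : ¬ p.1 < s := fun h => h2 ⟨hm, h⟩
              simp [pvPair, hm, hns]
            · have hlt : m < pvGroceryCost p.2 shopping_list := lt_of_le_of_ne hmle (Ne.symm hm)
              simp [pvPair, h1, hlt]
          rw [pvStepB, if_neg hcond]
        rw [ha, hb, ih]

-- the pvStepB fold returns a member of the list that lex-minimises the key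
theorem pvFoldB_spec (l : List (Int × String)) : ∀ x0 : Int × String,
    ∃ r, l.foldl pvStepB (some x0) = some r ∧ (r = x0 ∨ r ∈ l) ∧ pvKey r ≤ pvKey x0 ∧
      ∀ y ∈ l, pvKey r ≤ pvKey y := by
  induction l with
  | nil => intro x0; exact ⟨x0, rfl, Or.inl rfl, le_refl _, by simp⟩
  | cons x l ih =>
    intro x0
    simp only [List.foldl_cons]
    by_cases h : (decide (x.1 < x0.1) || !decide (x0.1 < x.1) && decide (x.2 < x0.2)) = true
    · have hlt : pvKey x < pvKey x0 := by
        have := pvBefore_eq x x0; rw [this] at h; exact of_decide_eq_true h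
      have hstep : pvStepB (some x0) x = some x := by rw [pvStepB, if_pos h]
      rw [hstep]
      obtain ⟨r, hr, hmem, hle, hall⟩ := ih x
      refine ⟨r, hr, ?_, le_of_lt (lt_of_le_of_lt hle hlt), ?_⟩
      · rcases hmem with h' | h'
        · exact Or.inr (by simp [h'])
        · exact Or.inr (List.mem_cons_of_mem _ h')
      · intro y hy
        rcases List.mem_cons.1 hy with h' | h'
        · exact h' ▸ hle
        · exact hall y h'
    · have hge : pvKey x0 ≤ pvKey x := by
        have := pvBefore_eq x x0; rw [this] at h
        exact le_of_not_gt fun hc => h (decide_eq_true hc)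
      have hstep : pvStepB (some x0) x = some x0 := by rw [pvStepB, if_neg h]
      rw [hstep]
      obtain ⟨r, hr, hmem, hle, hall⟩ := ih x0
      refine ⟨r, hr, ?_, hle, ?_⟩
      · rcases hmem with h' | h'
        · exact Or.inl h'
        · exact Or.inr (List.mem_cons_of_mem _ h')
      · intro y hy
        rcases List.mem_cons.1 hy with h' | h'
        · exact h' ▸ le_trans hle hge
        · exact hall y h'

-- duplicate-weight sum vanishes off the key set
theorem pvSum_indicator_zero (rest : List (String × Int)) (x : String)
    (hx : x ∉ rest.map Prod.fst) :
    (rest.map (fun q => (q.2 - 5) * (if q.1 == x then (1 : Int) else 0))).sum = 0 := by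
  apply List.sum_eq_zero
  intro v hv
  obtain ⟨q, hq, rfl⟩ := List.mem_map.1 hv
  have : q.1 ≠ x := fun h => hx (List.mem_map.2 ⟨q, hq, h⟩)
  simp [this]

-- with distinct keys, the indicator-weighted sum over the inventory is the lookup minus default
theorem pvSum_indicator (items : List (String × Int)) (x : String)
    (hnd : (items.map Prod.fst).Nodup) :
    (items.map (fun q => (q.2 - 5) * (if q.1 == x then (1 : Int) else 0))).sum
      = (PySem.Dict.mk items).getD x 5 - 5 := by
  induction items with
  | nil => simp [PySem.Dict.getD, PySem.Dict.get?]
  | cons kv rest ih =>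
    obtain ⟨k, v⟩ := kv
    simp only [List.map_cons, List.nodup_cons] at hnd
    obtain ⟨hk, hrest⟩ := hnd
    by_cases h : k = x
    · have hx : x ∉ rest.map Prod.fst := h ▸ hk
      rw [List.map_cons, List.sum_cons, pvSum_indicator_zero rest x hx]
      have hg : (PySem.Dict.mk ((k, v) :: rest)).getD x 5 = v := by
        rw [PySem.Dict.getD, PySem.Dict.get?_mk_cons]
        simp [h]
      rw [hg]
      simp [h]
    · rw [List.map_cons, List.sum_cons]
      have hg : (PySem.Dict.mk ((k, v) :: rest)).getD x 5 = (PySem.Dict.mk rest).getD x 5 := by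
        rw [PySem.Dict.getD, PySem.Dict.get?_mk_cons, PySem.Dict.getD]
        simp [h]
      rw [hg, ← ih hrest]
      simp [h]

-- A's per-item lookup sum equals B's inventory scan (distinct inventory keys)
theorem pvCost_inverted (items : List (String × Int)) (sl : List String)
    (hnd : (items.map Prod.fst).Nodup) :
    pvGroceryCost items sl
      = 5 * (sl.length : Int)
        + (items.map (fun q => (q.2 - 5) * ((sl.count q.1 : Nat) : Int))).sum := by
  have hstep : pvGroceryCost items sl = (sl.map (fun x => (PySem.Dict.mk items).getD x 5)).sum := by
    unfold pvGroceryCost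
    have h : (fun (total_cost : Int) (item : String) =>
        match PySem.Dict.get? (PySem.Dict.mk items) item with
        | some v => total_cost + v
        | none => total_cost + 5)
        = fun total_cost item => total_cost + PySem.Dict.getD (PySem.Dict.mk items) item 5 := by
      funext total_cost item
      simp only [PySem.Dict.getD]
      cases PySem.Dict.get? (PySem.Dict.mk items) item <;> simp
    rw [h, PySem.List.foldl_add]
    simp
  rw [hstep]; clear hstep
  induction sl with
  | nil => simp
  | cons x sl ihs =>
    rw [List.map_cons, List.sum_cons, ihs]
    have hcnt : ∀ q : String × Int,
        (((x :: sl).count q.1 : Nat) : Int) = ((sl.count q.1 : Nat) : Int) + (if q.1 == x then (1 : Int) else 0) := by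
      intro q
      rw [List.count_cons]
      by_cases h : q.1 = x
      · simp [h]
      · simp [h, Ne.symm h]
    have hmap : (items.map (fun q => (q.2 - 5) * (((x :: sl).count q.1 : Nat) : Int)))
        = (items.map (fun q => (q.2 - 5) * ((sl.count q.1 : Nat) : Int) + (q.2 - 5) * (if q.1 == x then (1 : Int) else 0))) := by
      apply List.map_congr_left
      intro q _
      rw [hcnt q, mul_add]
    rw [hmap, PySem.List.sum_map_add_int, pvSum_indicator items x hnd]
    simp only [List.length_cons]
    push_cast
    ring

-- B's pair list is A's pair list (under Pre_)
theorem pvPairs_eq (g : List (String × List (String × Int))) (sl : List String)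
    (hpre : Pre_cheapest_store g sl) :
    g.map (fun p =>
        (5 * (sl.length : Int)
          + (p.2.map (fun q => (q.2 - 5) *
              ((sl.foldl (fun d item => d.insert item (d.getD item 0 + 1)) PySem.Dict.empty).getD q.1 0))).sum,
         p.1))
      = g.map (pvPair sl) := by
  apply List.map_congr_left
  intro p hp
  have hneed : ∀ q : String × Int,
      (sl.foldl (fun d item => d.insert item (d.getD item 0 + 1)) PySem.Dict.empty).getD q.1 0
        = ((sl.count q.1 : Nat) : Int) := by
    intro q
    rw [PySem.Dict.getD_foldl_insert_add_one]
    simp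
  have hmap : (p.2.map (fun q => (q.2 - 5) *
      ((sl.foldl (fun d item => d.insert item (d.getD item 0 + 1)) PySem.Dict.empty).getD q.1 0)))
      = p.2.map (fun q => (q.2 - 5) * ((sl.count q.1 : Nat) : Int)) := by
    apply List.map_congr_left
    intro q _
    rw [hneed q]
  rw [hmap, pvPair, ← pvCost_inverted p.2 sl (hpre p hp)]

-- ===== VERDICT (by name: the statement is the Claim_ definition above) =====
theorem cheapest_store_spec : Claim_equal_cheapest_store := by
  intro g sl _ hpre
  unfold Spec_cheapest_store
  show cheapest_store g sl = cheapest_store_alt g sl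
  unfold cheapest_store_alt
  show cheapest_store g sl =
    match PySem.List.sorted2
        (g.map (fun p =>
          (5 * (sl.length : Int)
            + (p.2.map (fun q => (q.2 - 5) *
                ((sl.foldl (fun d item => d.insert item (d.getD item 0 + 1)) PySem.Dict.empty).getD q.1 0))).sum,
           p.1)))
        (fun q => q.1) (fun q => q.2) with
    | [] => ""
    | q :: _ => q.2
  rw [pvPairs_eq g sl hpre, pvSorted2_eq]
  cases g with
  | nil => rfl
  | cons p t =>
    rw [pvPortA_eq]
    simp only [List.foldl_cons, List.map_cons]
    rw [show pvStepA sl ((none : Option Int), "") p = (some (pvGroceryCost p.2 sl), p.1) from rfl]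
    rw [pvLoop_eq]
    rw [show (pvGroceryCost p.2 sl, p.1) = pvPair sl p from rfl]
    obtain ⟨r, hr, hrmem, hrle, hrall⟩ := pvFoldB_spec (t.map (pvPair sl)) (pvPair sl p)
    rw [hr]
    have hrmem' : r ∈ pvPair sl p :: t.map (pvPair sl) := by
      rcases hrmem with h | h
      · simp [h]
      · exact List.mem_cons_of_mem _ h
    have hrmin : ∀ y ∈ pvPair sl p :: t.map (pvPair sl), pvKey r ≤ pvKey y := by
      intro y hy
      rcases List.mem_cons.1 hy with h | h
      · exact h ▸ hrle
      · exact hrall y h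
    rcases hq : PySem.List.sorted (pvPair sl p :: t.map (pvPair sl)) pvKey with _ | ⟨q, rest⟩
    · exact absurd ((PySem.List.sorted_eq_nil_iff _ _ _).1 hq) (by simp)
    · have hqmem : q ∈ pvPair sl p :: t.map (pvPair sl) := by
        have : q ∈ PySem.List.sorted (pvPair sl p :: t.map (pvPair sl)) pvKey := by
          rw [hq]; exact List.mem_cons_self
        exact (PySem.List.mem_sorted _ _ _ _).1 this
      have hqmin : ∀ y ∈ pvPair sl p :: t.map (pvPair sl), pvKey q ≤ pvKey y :=
        PySem.List.key_head_sorted_le _ _ hq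
      have : r = q := pvKey_inj (le_antisymm (hrmin q hqmem) (hqmin r hrmem'))
      rw [this]
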